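-- pv_equiv track=rewrite | github.com/jasonkimprojects/rosalind-challenge | SORT.py | all_reversals
-- ===== SOURCE A (Python) =====
-- def all_reversals(arr):
--     reversals = {}
--     for start in range(len(arr) - 1):
--         for end in range(start + 1, len(arr)):
--             # Choose a substring to reverse
--             rev_part = arr[start: end + 1]
--             # Reverse, and stitch.
--             rev_tuple = arr[:start] + rev_part[::-1] + arr[end + 1:]
--             # Add to hash table, recording start and end.
--             reversals[rev_tuple] = (start, end)
--     return reversals
-- ===== SOURCE B (Python) =====
-- def all_reversals(arr):
--     n = len(arr)
--     return {
--         tuple(arr[s + e - i] if s <= i <= e else arr[i] for i in range(n)): (s, e)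
--         for s in range(n)
--         for e in range(s + 1, n)
--     }
-- ===== Notes on version B (the rewrite author's own statement) =====
-- stated objective: alternative
-- what changed: B builds each key directly by index reflection (element i is arr[s+e-i] inside the chosen window, arr[i] outside) in a single flat dict comprehension over all (start,end) pairs, instead of A's nested loops that slice, reverse and concatenate three subtuples per pair.
import Mathlib
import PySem

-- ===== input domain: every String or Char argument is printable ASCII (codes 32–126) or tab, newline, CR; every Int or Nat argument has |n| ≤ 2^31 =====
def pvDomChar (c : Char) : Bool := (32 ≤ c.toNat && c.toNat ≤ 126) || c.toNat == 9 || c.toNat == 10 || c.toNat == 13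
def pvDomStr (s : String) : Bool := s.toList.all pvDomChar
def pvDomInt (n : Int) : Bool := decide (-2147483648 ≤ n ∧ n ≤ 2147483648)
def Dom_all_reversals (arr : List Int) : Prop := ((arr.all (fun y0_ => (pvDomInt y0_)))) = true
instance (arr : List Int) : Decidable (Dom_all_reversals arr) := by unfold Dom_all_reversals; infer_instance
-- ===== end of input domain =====

-- B builds each key by index reflection (element i is arr[s+e-i] inside the reversed window,
-- arr[i] outside) over a flat pair sequence — no slicing and no reversal; same cost class.

-- ===== PORT A =====
-- rev_part[::-1] is List.reverse, exact by PySem.List.slice?_none_none_neg_one.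
def all_reversals (arr : List Int) : List (List Int × Int × Int) :=
  ((PySem.List.pyRange 0 ((arr.length : Int) - 1) 1).foldl (fun d start =>
    (PySem.List.pyRange (start + 1) (arr.length : Int) 1).foldl (fun d e =>
      let rev_part := PySem.List.slice arr (some start) (some (e + 1))
      let rev_tuple := PySem.List.slice arr none (some start) ++ rev_part.reverse ++
        PySem.List.slice arr (some (e + 1)) none
      d.insert rev_tuple (start, e)) d)
    (PySem.Dict.empty : PySem.Dict (List Int) (Int × Int))).items

-- ===== PORT B =====
-- arr[i] and arr[s+e-i] always have an in-range nonnegative index here, so pyGetD … 0 is exact.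
def all_reversals_alt (arr : List Int) : List (List Int × Int × Int) :=
  let n : Int := arr.length
  (((PySem.List.pyRange 0 n 1).flatMap (fun s =>
      (PySem.List.pyRange (s + 1) n 1).map (fun e => (s, e)))).foldl
    (fun (d : PySem.Dict (List Int) (Int × Int)) se =>
      d.insert ((PySem.List.pyRange 0 n 1).map (fun i =>
          if se.1 ≤ i ∧ i ≤ se.2 then PySem.List.pyGetD arr (se.1 + se.2 - i) 0
          else PySem.List.pyGetD arr i 0)) se)
    PySem.Dict.empty).items

-- ===== PRECONDITION & SPEC =====
def Spec_all_reversals (arr : List Int) (out : List (List Int × Int × Int)) : Prop := out = all_reversals_alt arr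
instance (arr : List Int) (out : List (List Int × Int × Int)) : Decidable (Spec_all_reversals arr out) := by unfold Spec_all_reversals; infer_instance

-- ===== CLAIM (what is proved, stated in full; the proofs are below) =====
def Claim_equal_all_reversals : Prop := ∀ (arr : List Int), Dom_all_reversals arr → Spec_all_reversals arr (all_reversals arr)

-- ===== LEMMAS AND PROOFS =====

-- the reflected-index key equals A's slice-and-reverse key
theorem pv_key (arr : List Int) (s e : ℕ) (hse : s < e) (he : e < arr.length) :
    ((PySem.List.pyRange 0 (arr.length : Int) 1).map (fun i =>
        if (s : Int) ≤ i ∧ i ≤ (e : Int) then PySem.List.pyGetD arr ((s : Int) + (e : Int) - i) 0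
        else PySem.List.pyGetD arr i 0))
      = PySem.List.slice arr none (some (s : Int)) ++
        (PySem.List.slice arr (some (s : Int)) (some ((e : Int) + 1))).reverse ++
        PySem.List.slice arr (some ((e : Int) + 1)) none := by
  have h1 : ((e : Int) + 1) = ((e + 1 : ℕ) : Int) := by push_cast; ring
  rw [h1, PySem.List.slice_natCast, PySem.List.slice_to _ (by positivity),
      PySem.List.slice_from _ (by positivity), PySem.List.pyRange_zero_natCast, List.map_map]
  simp only [Int.toNat_natCast]
  have hget : ∀ (k : ℕ) (hk : k < arr.length), PySem.List.pyGetD arr (k : Int) 0 = arr[k]'hk := by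
    intro k hk
    rw [PySem.List.pyGetD_natCast, List.getD_eq_getElem?_getD, List.getElem?_eq_getElem hk,
      Option.getD_some]
  apply List.ext_getElem
  · simp; omega
  · intro i hi hi2
    simp only [List.getElem_map, List.getElem_range, Function.comp_apply]
    have hiN : i < arr.length := by simpa using hi
    have hm1 : min s arr.length = s := by omega
    have hm2 : min (e + 1 - s) (arr.length - s) = e + 1 - s := by omega
    simp only [List.getElem_append, List.length_append, List.length_take, List.length_reverse,
      List.length_drop, List.getElem_reverse, List.getElem_take, List.getElem_drop, hm1, hm2]
    split_ifs with hc h2 h3 h4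
    · exfalso; omega
    · have hidx : (s : Int) + (e : Int) - (i : Int) = ((s + e - i : ℕ) : Int) := by omega
      rw [hidx, hget _ (by omega)]
      congr 1; omega
    · exfalso; omega
    · rw [hget _ hiN]
    · exfalso; omega
    · rw [hget _ hiN]; congr 1; omega

-- the same key equality, stated for Int coordinates as they appear in the folds
theorem pv_key_int (arr : List Int) (s e : Int) (h0 : 0 ≤ s) (hse : s < e)
    (he : e < (arr.length : Int)) :
    ((PySem.List.pyRange 0 (arr.length : Int) 1).map (fun i =>
        if s ≤ i ∧ i ≤ e then PySem.List.pyGetD arr (s + e - i) 0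
        else PySem.List.pyGetD arr i 0))
      = PySem.List.slice arr none (some s) ++
        (PySem.List.slice arr (some s) (some (e + 1))).reverse ++
        PySem.List.slice arr (some (e + 1)) none := by
  lift s to ℕ using h0 with a
  lift e to ℕ using (le_of_lt (lt_of_le_of_lt (Int.natCast_nonneg a) hse)) with b
  exact pv_key arr a b (by exact_mod_cast hse) (by exact_mod_cast he)

-- outer loops agree: B's flattened fold over start ∈ [s, n) equals A's over start ∈ [s, n-1)
theorem pv_outer (arr : List Int) : ∀ (m : ℕ) (s : Int), 0 ≤ s →
    (((arr.length : Int)) - s).toNat = m →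
    ∀ (d : PySem.Dict (List Int) (Int × Int)),
    (PySem.List.pyRange s (arr.length : Int) 1).foldl (fun d s =>
        (PySem.List.pyRange (s + 1) (arr.length : Int) 1).foldl (fun d e =>
          d.insert ((PySem.List.pyRange 0 (arr.length : Int) 1).map (fun i =>
              if s ≤ i ∧ i ≤ e then PySem.List.pyGetD arr (s + e - i) 0
              else PySem.List.pyGetD arr i 0)) (s, e)) d) d
      = (PySem.List.pyRange s ((arr.length : Int) - 1) 1).foldl (fun d start =>
          (PySem.List.pyRange (start + 1) (arr.length : Int) 1).foldl (fun d e =>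
            d.insert (PySem.List.slice arr none (some start) ++
              (PySem.List.slice arr (some start) (some (e + 1))).reverse ++
              PySem.List.slice arr (some (e + 1)) none) (start, e)) d) d := by
  intro m
  induction m with
  | zero =>
    intro s hs0 hm d
    rw [PySem.List.pyRange_one_eq_nil (show (arr.length : Int) ≤ s by omega),
      PySem.List.pyRange_one_eq_nil (show (arr.length : Int) - 1 ≤ s by omega)]
    rfl
  | succ k ih =>
    intro s hs0 hm d
    have hlt : s < (arr.length : Int) := by omega
    rw [PySem.List.pyRange_one_cons hlt]
    by_cases hlast : s + 1 < (arr.length : Int)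
    · rw [PySem.List.pyRange_one_cons (show s < (arr.length : Int) - 1 by omega)]
      simp only [List.foldl_cons]
      rw [ih (s + 1) (by omega) (by omega)]
      congr 1
      refine PySem.List.foldl_congr_mem _ _ _ _ (fun d' e hee => ?_)
      obtain ⟨he0, he1⟩ := PySem.List.mem_pyRange_one.mp hee
      simp only [pv_key_int arr s e hs0 (by omega) he1]
    · -- s = n - 1: A's outer range is empty and B's inner range at s is empty
      rw [PySem.List.pyRange_one_eq_nil (show (arr.length : Int) - 1 ≤ s by omega),
        PySem.List.pyRange_one_eq_nil (show (arr.length : Int) ≤ s + 1 by omega)]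
      simp only [List.foldl_cons, List.foldl_nil]
      rw [PySem.List.pyRange_one_eq_nil (show (arr.length : Int) ≤ s + 1 by omega)]
      simp only [List.foldl_nil]

-- ===== VERDICT (by name: the statement is the Claim_ definition above) =====
theorem all_reversals_spec : Claim_equal_all_reversals := by
  intro arr _
  unfold Spec_all_reversals all_reversals all_reversals_alt
  refine congrArg PySem.Dict.items ?_
  rw [List.foldl_flatMap]
  simp only [List.foldl_map]
  exact (pv_outer arr ((arr.length : Int) - 0).toNat 0 (le_refl 0) rfl PySem.Dict.empty).symm
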